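-- pv_equiv track=rewrite | github.com/Oscar-Ge/WebCoEvo | linkding_xvr_minimal/rule_pipeline/reflection_gaps.py | _has_repeated_hidden_click
-- ===== SOURCE A (Python) =====
-- def _has_repeated_hidden_click(steps):
--     seen = {}
--     for step in steps:
--         action = str(step.get("action") or "").strip()
--         text = " ".join([action, str(step.get("error") or ""), str(step.get("model_output") or "")]).lower()
--         if not action:
--             continue
--         if any(marker in text for marker in ["hidden", "not visible", "timed-out", "timeout", "not stable"]):
--             seen[action] = seen.get(action, 0) + 1
--     return any(count >= 2 for count in seen.values())
-- ===== SOURCE B (Python) =====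
-- def _qualify(step):
--     action = str(step.get("action") or "").strip()
--     if not action:
--         return None
--     text = " ".join([action, str(step.get("error") or ""), str(step.get("model_output") or "")]).lower()
--     for marker in ("hidden", "not visible", "timed-out", "timeout", "not stable"):
--         if marker in text:
--             return action
--     return None
--
--
-- def _has_repeated_hidden_click(steps):
--     def go(rest, seen):
--         if not rest:
--             return False
--         a = _qualify(rest[0])
--         if a is None:
--             return go(rest[1:], seen)
--         if a in seen:
--             return True
--         return go(rest[1:], seen | {a})
--     return go(list(steps), set())
-- ===== Notes on version B (the rewrite author's own statement) =====
-- stated objective: alternative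
-- what changed: Replaces the count-dictionary-plus-final-threshold-scan by a recursive single pass with a seen-set that returns True at the first repeated qualifying action (early exit), with the qualifying-action filter factored into a helper.
import Mathlib
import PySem

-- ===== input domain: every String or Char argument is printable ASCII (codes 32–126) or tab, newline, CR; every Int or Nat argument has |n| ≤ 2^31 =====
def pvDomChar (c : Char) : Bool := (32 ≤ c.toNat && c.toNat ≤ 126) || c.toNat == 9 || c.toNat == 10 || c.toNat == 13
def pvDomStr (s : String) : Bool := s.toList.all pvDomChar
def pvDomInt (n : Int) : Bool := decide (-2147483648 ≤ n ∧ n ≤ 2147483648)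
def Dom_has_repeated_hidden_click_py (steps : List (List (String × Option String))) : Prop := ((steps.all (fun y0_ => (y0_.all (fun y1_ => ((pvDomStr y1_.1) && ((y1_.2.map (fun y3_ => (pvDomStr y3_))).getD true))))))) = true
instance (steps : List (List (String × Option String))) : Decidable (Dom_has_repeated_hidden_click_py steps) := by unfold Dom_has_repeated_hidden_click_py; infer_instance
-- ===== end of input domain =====

-- B replaces A's count-dictionary-plus-final-threshold-scan by a recursive
-- single pass with a seen-set, returning True at the first repeated qualifying
-- action (objective: alternative algorithm, same result).

-- ===== PORT A =====
-- str(step.get(k) or "") : a missing key, a None value or "" all give ""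
def pvGetOr (step : PySem.Dict String (Option String)) (k : String) : String :=
  ((PySem.Dict.get? step k).getD none).getD ""

def has_repeated_hidden_click_py (steps : List (List (String × Option String))) : Bool :=
  let seen := steps.foldl (fun (seen : PySem.Dict String Int) step =>
    let step : PySem.Dict String (Option String) := ⟨step⟩
    let action := PySem.Str.strip (pvGetOr step "action")
    let text := PySem.Str.lower (PySem.Str.join " " [action, pvGetOr step "error", pvGetOr step "model_output"])
    if action == "" then seen
    else if ["hidden", "not visible", "timed-out", "timeout", "not stable"].any
        (fun marker => PySem.Str.isIn marker text) then
      PySem.Dict.insert seen action (PySem.Dict.getD seen action 0 + 1)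
    else seen) PySem.Dict.empty
  (PySem.Dict.values seen).any (fun count => decide (2 ≤ count))

-- ===== PORT B =====
-- helper _qualify of Source B; the 'for marker in …: if marker in text: return action'
-- loop is ported as find?/any over the marker list (exact: first hit decides)
def pvQualify (step : List (String × Option String)) : Option String :=
  let step : PySem.Dict String (Option String) := ⟨step⟩
  let action := PySem.Str.strip (pvGetOr step "action")
  if action == "" then none
  else
    let text := PySem.Str.lower (PySem.Str.join " " [action, pvGetOr step "error", pvGetOr step "model_output"])
    if ["hidden", "not visible", "timed-out", "timeout", "not stable"].any
        (fun marker => PySem.Str.isIn marker text) then some action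
    else none

-- inner recursive go(rest, seen) of Source B
def pvGo (rest : List (List (String × Option String))) (seen : PySem.Set String) : Bool :=
  match rest with
  | [] => false
  | s :: t =>
    match pvQualify s with
    | none => pvGo t seen
    | some a => if PySem.Set.contains seen a then true else pvGo t (PySem.Set.add seen a)

def has_repeated_hidden_click_py_alt (steps : List (List (String × Option String))) : Bool :=
  pvGo steps PySem.Set.empty

-- ===== PRECONDITION & SPEC =====
def Spec_has_repeated_hidden_click_py (steps : List (List (String × Option String))) (out : Bool) : Prop := out = has_repeated_hidden_click_py_alt steps
instance (steps : List (List (String × Option String))) (out : Bool) : Decidable (Spec_has_repeated_hidden_click_py steps out) := by unfold Spec_has_repeated_hidden_click_py; infer_instance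

-- ===== CLAIM (what is proved, stated in full; the proofs are below) =====
def Claim_equal_has_repeated_hidden_click_py : Prop := ∀ (steps : List (List (String × Option String))), Dom_has_repeated_hidden_click_py steps → Spec_has_repeated_hidden_click_py steps (has_repeated_hidden_click_py steps)

-- ===== LEMMAS AND PROOFS =====

theorem stepA_eq : (fun (seen : PySem.Dict String Int) (step : List (String × Option String)) =>
    let step : PySem.Dict String (Option String) := ⟨step⟩
    let action := PySem.Str.strip (pvGetOr step "action")
    let text := PySem.Str.lower (PySem.Str.join " " [action, pvGetOr step "error", pvGetOr step "model_output"])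
    if action == "" then seen
    else if ["hidden", "not visible", "timed-out", "timeout", "not stable"].any
        (fun marker => PySem.Str.isIn marker text) then
      PySem.Dict.insert seen action (PySem.Dict.getD seen action 0 + 1)
    else seen)
  = (fun seen step => match pvQualify step with
      | some a => PySem.Dict.insert seen a (PySem.Dict.getD seen a 0 + 1)
      | none => seen) := by
  funext seen step
  simp only [pvQualify]
  split_ifs <;> rfl

theorem foldl_qual_count (l : List (List (String × Option String))) (d : PySem.Dict String Int) :
    l.foldl (fun seen step => match pvQualify step with
      | some a => PySem.Dict.insert seen a (PySem.Dict.getD seen a 0 + 1)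
      | none => seen) d
      = (l.filterMap pvQualify).foldl
          (fun seen a => PySem.Dict.insert seen a (PySem.Dict.getD seen a 0 + 1)) d := by
  induction l generalizing d with
  | nil => rfl
  | cons x t ih => cases hg : pvQualify x <;> simp [hg, ih]

theorem counter_side (xs : List String) :
    ((PySem.Dict.values
        (xs.foldl (fun (seen : PySem.Dict String Int) a => PySem.Dict.insert seen a (PySem.Dict.getD seen a 0 + 1))
          PySem.Dict.empty)).any (fun count => decide (2 ≤ count)))
    = !xs.Nodup := by
  rw [PySem.Dict.foldl_insert_getD_add_one_eq_counter]
  simp only [PySem.Dict.values, PySem.Dict.items_counter, List.map_map, List.any_map,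
    Function.comp_def]
  rcases h : (!xs.Nodup) with _ | _
  · simp only [Bool.not_eq_false'] at h
    simp only [List.any_eq_false]
    intro a _
    have := List.nodup_iff_count_le_one.mp (by simpa using h) a
    simp only [decide_eq_true_eq, not_le]
    exact_mod_cast Nat.lt_of_le_of_lt this (by norm_num)
  · simp only [Bool.not_eq_true'] at h
    rw [List.any_eq_true]
    have h' : ¬ xs.Nodup := by simpa using h
    rw [List.nodup_iff_count_le_one] at h'
    push Not at h'
    obtain ⟨a, ha⟩ := h'
    refine ⟨a, ?_, by simp; exact_mod_cast ha⟩
    rw [PySem.Set.mem_ofList]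
    exact List.count_pos_iff.mp (by omega)

theorem a_eq (steps : List (List (String × Option String))) :
    has_repeated_hidden_click_py steps = !(steps.filterMap pvQualify).Nodup := by
  simp only [has_repeated_hidden_click_py, stepA_eq, foldl_qual_count]
  exact counter_side _

theorem go_eq (l : List (List (String × Option String))) (seen : PySem.Set String)
    (hnd : seen.Nodup) :
    pvGo l seen = !(seen ++ l.filterMap pvQualify).Nodup := by
  induction l generalizing seen with
  | nil => simp [pvGo, hnd]
  | cons s t ih =>
    rw [pvGo]
    cases hg : pvQualify s with
    | none => simp [hg, ih seen hnd]
    | some a =>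
      simp only [hg, List.filterMap_cons]
      by_cases hmem : a ∈ seen
      · have : ¬ (seen ++ a :: t.filterMap pvQualify).Nodup := by
          intro hnodup
          exact (List.disjoint_of_nodup_append hnodup) hmem (by simp)
        simp [PySem.Set.contains, hmem, this]
      · have hcts : PySem.Set.contains seen a = false := by
          simp [PySem.Set.contains, hmem]
        have hadd : PySem.Set.add seen a = seen ++ [a] := by
          simp [PySem.Set.add, PySem.Set.contains, hmem]
        have hnd' : (PySem.Set.add seen a).Nodup := by
          rw [hadd, List.nodup_append]
          exact ⟨hnd, List.nodup_singleton a, by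
            intro x hx y hy
            rw [List.mem_singleton] at hy
            subst hy
            exact fun he => hmem (he ▸ hx)⟩
        rw [hcts]
        simp only [Bool.false_eq_true, if_false]
        rw [ih _ hnd', hadd, List.append_assoc, List.singleton_append]

theorem b_eq (steps : List (List (String × Option String))) :
    has_repeated_hidden_click_py_alt steps = !(steps.filterMap pvQualify).Nodup := by
  rw [has_repeated_hidden_click_py_alt, go_eq _ _ (by simp [PySem.Set.empty])]
  rfl

-- ===== VERDICT (by name: the statement is the Claim_ definition above) =====
theorem has_repeated_hidden_click_py_spec : Claim_equal_has_repeated_hidden_click_py := by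
  intro steps _
  unfold Spec_has_repeated_hidden_click_py
  rw [a_eq, b_eq]
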